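-- pv_equiv track=rewrite | github.com/Vivek-00101/DSDL-22-26 | dhairya/q4.py | find
-- ===== SOURCE A (Python) =====
-- def find(input_tuple):
--     if not input_tuple:
--         return None, None  # Return None for both largest and smallest if the tuple is empty
--
--     largest = smallest = input_tuple[0]
--
--     for element in input_tuple:
--         if element > largest:
--             largest = element
--         elif element < smallest:
--             smallest = element
--
--     return largest, smallest
-- ===== SOURCE B (Python) =====
-- def find(input_tuple):
--     if not input_tuple:
--         return None, None
--     return max(input_tuple), min(input_tuple)
-- ===== Notes on version B (the rewrite author's own statement) =====
-- stated objective: idiomatic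
-- what changed: Replaces the single tracking loop maintaining two running extremes with two independent scans via the max and min builtins.
import Mathlib
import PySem

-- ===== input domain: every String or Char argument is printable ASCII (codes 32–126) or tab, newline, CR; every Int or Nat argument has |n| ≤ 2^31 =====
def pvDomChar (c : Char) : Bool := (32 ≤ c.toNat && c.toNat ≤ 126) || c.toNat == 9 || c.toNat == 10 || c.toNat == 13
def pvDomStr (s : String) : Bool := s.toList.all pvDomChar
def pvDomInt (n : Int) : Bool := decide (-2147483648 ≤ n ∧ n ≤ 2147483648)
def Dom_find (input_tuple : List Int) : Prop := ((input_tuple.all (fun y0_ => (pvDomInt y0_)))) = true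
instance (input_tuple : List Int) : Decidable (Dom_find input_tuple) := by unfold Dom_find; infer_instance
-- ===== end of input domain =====

-- B replaces A's single tracking loop (two running extremes) with two independent builtin scans: (max t, min t); idiomatic, same cost.


-- ===== PORT A =====
-- one pass maintaining (largest, smallest); branches in A's order (elif)
def find (input_tuple : List Int) : Option Int × Option Int :=
  match input_tuple with
  | [] => (none, none)
  | x :: _ =>
    let p := input_tuple.foldl
      (fun (st : Int × Int) e =>
        if e > st.1 then (e, st.2) else if e < st.2 then (st.1, e) else st)
      (x, x)
    (some p.1, some p.2)

-- ===== PORT B =====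
def find_alt (input_tuple : List Int) : Option Int × Option Int :=
  if input_tuple = [] then (none, none)
  else (PySem.List.max? input_tuple (fun y => y), PySem.List.min? input_tuple (fun y => y))

-- ===== PRECONDITION & SPEC =====
def Spec_find (input_tuple : List Int) (out : Option Int × Option Int) : Prop := out = find_alt input_tuple
instance (input_tuple : List Int) (out : Option Int × Option Int) : Decidable (Spec_find input_tuple out) := by unfold Spec_find; infer_instance

-- ===== CLAIM (what is proved, stated in full; the proofs are below) =====
def Claim_equal_find : Prop := ∀ (input_tuple : List Int), Dom_find input_tuple → Spec_find input_tuple (find input_tuple)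

-- ===== LEMMAS AND PROOFS =====
-- A's combined loop computes the running max in the first component and the running min in the second.
theorem find_fold_eq (rest : List Int) : ∀ (l s : Int), s ≤ l →
    rest.foldl (fun (st : Int × Int) e =>
        if e > st.1 then (e, st.2) else if e < st.2 then (st.1, e) else st) (l, s)
      = (rest.foldl max l, rest.foldl min s) := by
  induction rest with
  | nil => intro l s _; rfl
  | cons e t ih =>
    intro l s hsl
    simp only [List.foldl_cons]
    by_cases h1 : e > l
    · rw [if_pos h1, max_eq_right (le_of_lt h1),
          show min s e = s from min_eq_left (hsl.trans (le_of_lt h1))]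
      exact ih e s (hsl.trans (le_of_lt h1))
    · rw [if_neg h1, max_eq_left (le_of_not_gt h1)]
      by_cases h2 : e < s
      · rw [if_pos h2, min_eq_right (le_of_lt h2)]
        exact ih l e ((le_of_lt h2).trans hsl)
      · rw [if_neg h2, min_eq_left (le_of_not_gt h2)]
        exact ih l s hsl

-- ===== VERDICT (by name: the statement is the Claim_ definition above) =====
theorem find_spec : Claim_equal_find := by
  intro t _
  unfold Spec_find find find_alt
  cases t with
  | nil => rfl
  | cons x rest =>
    simp only [List.foldl_cons, if_neg (lt_irrefl x), reduceCtorEq, if_false]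
    rw [find_fold_eq rest x x le_rfl,
        PySem.List.max?_id_cons, PySem.List.min?_id_cons]
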